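-- pv_equiv track=rewrite | github.com/A-Jiango/longchat-local | chat_gui.py | _find_inline_math_end
-- ===== SOURCE A (Python) =====
-- def _find_inline_math_end(text: str, start: int) -> int:
--     index = start
--     while index < len(text):
--         if text[index] == "$" and not _is_escaped(text, index):
--             if index + 1 < len(text) and text[index + 1] == "$":
--                 return -1
--             return index
--         index += 1
--     return -1
--
-- def _is_escaped(text: str, index: int) -> bool:
--     backslashes = 0
--     probe = index - 1
--     while probe >= 0 and text[probe] == "\\":
--         backslashes += 1
--         probe -= 1
--     return backslashes % 2 == 1
-- ===== SOURCE B (Python) =====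
-- def _find_inline_math_end(text: str, start: int) -> int:
--     n = len(text)
--     run = 0  # length of the backslash run ending just before position i
--     for i in range(n):
--         ch = text[i]
--         if i >= start and ch == "$" and run % 2 == 0:
--             return -1 if i + 1 < n and text[i + 1] == "$" else i
--         run = run + 1 if ch == "\\" else 0
--     return -1
-- ===== Notes on version B (the rewrite author's own statement) =====
-- stated objective: alternative
-- what changed: Single forward pass maintaining the running backslash-run length (parity decides escapedness) instead of backtracking over the preceding backslashes at every '$'.
-- outside the precondition, e.g. on _find_inline_math_end('a$b', -2): A returns -2, B returns 1; on _find_inline_math_end('$a', -1): A returns 0, B returns 0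
import Mathlib
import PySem

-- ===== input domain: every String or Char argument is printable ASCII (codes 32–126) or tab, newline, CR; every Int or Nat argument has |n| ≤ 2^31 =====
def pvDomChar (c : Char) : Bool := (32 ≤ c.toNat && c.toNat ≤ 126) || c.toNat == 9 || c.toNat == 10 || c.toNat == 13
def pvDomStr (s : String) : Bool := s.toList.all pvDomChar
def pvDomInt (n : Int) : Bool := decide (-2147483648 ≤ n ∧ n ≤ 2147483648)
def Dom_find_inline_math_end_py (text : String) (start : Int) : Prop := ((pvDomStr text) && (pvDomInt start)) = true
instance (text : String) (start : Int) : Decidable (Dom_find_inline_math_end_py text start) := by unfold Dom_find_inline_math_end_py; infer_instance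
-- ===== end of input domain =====

-- B replaces A's per-'$' backward backslash scan by one forward pass that maintains the
-- running backslash-run length (its parity decides escapedness).

-- ===== PORT A =====
-- while-loop of _is_escaped: count backslashes walking left from `probe`; fuel ≥ probe+1 steps suffice
def pvEscLoop (cs : List Char) (probe : Int) (backslashes : Int) : Nat → Int
  | 0 => backslashes
  | fuel+1 =>
    if 0 ≤ probe ∧ PySem.List.pyGet? cs probe = some '\\' then
      pvEscLoop cs (probe - 1) (backslashes + 1) fuel
    else backslashes

def pv_is_escaped (cs : List Char) (index : Int) : Bool :=
  PySem.Int.mod (pvEscLoop cs (index - 1) 0 index.toNat) 2 == 1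

-- the main while-loop of _find_inline_math_end; fuel = number of remaining indices
def pvALoop (cs : List Char) (n : Int) (index : Int) : Nat → Int
  | 0 => -1
  | fuel+1 =>
    if index < n then
      if PySem.List.pyGet? cs index = some '$' ∧ ¬ pv_is_escaped cs index = true then
        if index + 1 < n ∧ PySem.List.pyGet? cs (index + 1) = some '$' then -1 else index
      else pvALoop cs n (index + 1) fuel
    else -1

def find_inline_math_end_py (text : String) (start : Int) : Int :=
  let cs := text.toList
  pvALoop cs (cs.length : Int) start ((cs.length : Int) - start).toNat

-- ===== PORT B =====
-- single forward pass over the characters, carrying position i and the running backslash-run length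
def pvBLoop (cs : List Char) (n : Int) (start : Int) : List Char → Int → Int → Int
  | [], _, _ => -1
  | ch :: rest, i, run =>
    if start ≤ i ∧ ch = '$' ∧ PySem.Int.mod run 2 = 0 then
      if i + 1 < n ∧ PySem.List.pyGet? cs (i + 1) = some '$' then -1 else i
    else pvBLoop cs n start rest (i + 1) (if ch = '\\' then run + 1 else 0)

def find_inline_math_end_py_alt (text : String) (start : Int) : Int :=
  let cs := text.toList
  pvBLoop cs (cs.length : Int) start cs 0 0

-- ===== PRECONDITION & SPEC =====
-- Pre_ excludes negative start on text containing '$' (there A's negative-index wraparound scans the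
-- string's suffix with escape detection disabled and pairs text[-1] with text[0], an accidental
-- behaviour no caller reaches, while B simply scans from position 0) and start < -len(text),
-- where A raises IndexError; negative start on '$'-free text (both trivially return -1) is admitted.
def Pre_find_inline_math_end_py (text : String) (start : Int) : Prop :=
  0 ≤ start ∨ (-(text.toList.length : Int) ≤ start ∧ '$' ∉ text.toList)
instance (text : String) (start : Int) : Decidable (Pre_find_inline_math_end_py text start) := by unfold Pre_find_inline_math_end_py; infer_instance
def pvWitness_find_inline_math_end_py : String × Int := ("a\\$ $b", 0)

def Spec_find_inline_math_end_py (text : String) (start : Int) (out : Int) : Prop := out = find_inline_math_end_py_alt text start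
instance (text : String) (start : Int) (out : Int) : Decidable (Spec_find_inline_math_end_py text start out) := by unfold Spec_find_inline_math_end_py; infer_instance

-- ===== CLAIM (what is proved, stated in full; the proofs are below) =====
def Claim_equal_find_inline_math_end_py : Prop := ∀ (text : String) (start : Int), Dom_find_inline_math_end_py text start → Pre_find_inline_math_end_py text start → Spec_find_inline_math_end_py text start (find_inline_math_end_py text start)

-- ===== LEMMAS AND PROOFS =====

-- length of the backslash run ending just before position i (what B's `run` holds at position i)
def pvRun (cs : List Char) : Nat → Int
  | 0 => 0
  | i+1 => if cs.getD i ' ' = '\\' then pvRun cs i + 1 else 0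

theorem pvRun_nonneg (cs : List Char) (i : Nat) : 0 ≤ pvRun cs i := by
  induction i with
  | zero => simp [pvRun]
  | succ i ih => simp only [pvRun]; split <;> omega

theorem pvEscLoop_eq (cs : List Char) (p : Nat) (hp : p ≤ cs.length) :
    ∀ (b : Int) (fuel : Nat), p ≤ fuel → pvEscLoop cs ((p : Int) - 1) b fuel = b + pvRun cs p := by
  induction p with
  | zero =>
    intro b fuel _
    cases fuel with
    | zero => simp [pvEscLoop, pvRun]
    | succ f => simp [pvEscLoop, pvRun]
  | succ p ih =>
    intro b fuel hf
    obtain ⟨f, rfl⟩ : ∃ f, fuel = f + 1 := ⟨fuel - 1, by omega⟩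
    have hplen : p < cs.length := by omega
    have hcast : ((p + 1 : Nat) : Int) - 1 = (p : Int) := by push_cast; ring
    rw [hcast]
    simp only [pvEscLoop]
    have hget : PySem.List.pyGet? cs (p : Int) = some cs[p] := by
      rw [PySem.List.pyGet?_natCast]; simp [hplen]
    have hgetD : cs.getD p ' ' = cs[p] := by
      simp [List.getD, hplen]
    by_cases hbs : cs[p] = '\\'
    · rw [if_pos ⟨by positivity, by rw [hget, hbs]⟩]
      rw [ih (by omega) (b + 1) f (by omega)]
      simp only [pvRun, hgetD, if_pos hbs]; ring
    · rw [if_neg (by rintro ⟨-, h⟩; rw [hget] at h; exact hbs (by injection h))]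
      simp only [pvRun, hgetD]
      rw [if_neg hbs]
      omega

theorem pv_is_escaped_eq (cs : List Char) (i : Nat) (hi : i ≤ cs.length) :
    pv_is_escaped cs (i : Int) = (PySem.Int.mod (pvRun cs i) 2 == 1) := by
  unfold pv_is_escaped
  rw [Int.toNat_natCast, pvEscLoop_eq cs i hi 0 i le_rfl, zero_add]

theorem pvMain (cs : List Char) (start : Int) :
    ∀ (k i : Nat), cs.length = i + k → start ≤ (i : Int) →
      pvALoop cs (cs.length : Int) (i : Int) k =
      pvBLoop cs (cs.length : Int) start (cs.drop i) (i : Int) (pvRun cs i) := by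
  intro k
  induction k with
  | zero =>
    intro i hk _
    have : cs.drop i = [] := List.drop_eq_nil_of_le (by omega)
    simp [pvALoop, pvBLoop, this]
  | succ k ih =>
    intro i hk hs
    have hilen : i < cs.length := by omega
    have hdrop : cs.drop i = cs[i] :: cs.drop (i + 1) := List.drop_eq_getElem_cons hilen
    have hget : PySem.List.pyGet? cs (i : Int) = some cs[i] := by
      rw [PySem.List.pyGet?_natCast]; simp [hilen]
    have hgetD : cs.getD i ' ' = cs[i] := by simp [List.getD, hilen]
    have hesc := pv_is_escaped_eq cs i (le_of_lt hilen)
    have hrnn := pvRun_nonneg cs i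
    have hmod := PySem.Int.mod_eq_emod_of_pos (a := pvRun cs i) (b := 2) (by norm_num)
    simp only [pvALoop, hdrop, pvBLoop]
    rw [if_pos (by exact_mod_cast hilen)]
    by_cases hdollar : cs[i] = '$'
    · by_cases hpar : pvRun cs i % 2 = 0
      · have hCA : PySem.List.pyGet? cs (i : Int) = some '$' ∧ ¬ pv_is_escaped cs (i : Int) = true := by
          refine ⟨by rw [hget, hdollar], ?_⟩
          rw [hesc, hmod, hpar]; decide
        have hCB : start ≤ (i : Int) ∧ cs[i] = '$' ∧ PySem.Int.mod (pvRun cs i) 2 = 0 := by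
          exact ⟨hs, hdollar, by rw [hmod]; exact hpar⟩
        rw [if_pos hCA, if_pos hCB]
      · have hodd : pvRun cs i % 2 = 1 := by omega
        rw [if_neg (by rintro ⟨-, h⟩; rw [hesc, hmod, hodd] at h; exact h (by decide)),
            if_neg (by rintro ⟨-, -, h⟩; rw [hmod] at h; omega)]
        have hcast : ((i : Int) + 1) = ((i + 1 : Nat) : Int) := by push_cast; ring
        rw [hcast, ih (i + 1) (by omega) (by push_cast; omega)]
        simp only [pvRun, hgetD]
    · rw [if_neg (by rintro ⟨h, -⟩; rw [hget] at h; exact hdollar (by injection h)),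
          if_neg (by rintro ⟨-, h, -⟩; exact hdollar h)]
      have hcast : ((i : Int) + 1) = ((i + 1 : Nat) : Int) := by push_cast; ring
      rw [hcast, ih (i + 1) (by omega) (by push_cast; omega)]
      simp only [pvRun, hgetD]

theorem pvPrefix (cs : List Char) (start : Int) (s : Nat) (hs : s ≤ cs.length)
    (hstart : (s : Int) ≤ start) :
    ∀ (d i : Nat), i + d = s →
      pvBLoop cs (cs.length : Int) start (cs.drop i) (i : Int) (pvRun cs i) =
      pvBLoop cs (cs.length : Int) start (cs.drop s) (s : Int) (pvRun cs s) := by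
  intro d
  induction d with
  | zero => intro i hi; subst hi; simp
  | succ d ih =>
    intro i hi
    have hilen : i < cs.length := by omega
    have hdrop : cs.drop i = cs[i] :: cs.drop (i + 1) := List.drop_eq_getElem_cons hilen
    have hgetD : cs.getD i ' ' = cs[i] := by simp [List.getD, hilen]
    rw [hdrop]
    simp only [pvBLoop]
    rw [if_neg (by rintro ⟨h, -⟩; omega)]
    have hcast : ((i : Int) + 1) = ((i + 1 : Nat) : Int) := by push_cast; ring
    have : (if cs[i] = '\\' then pvRun cs i + 1 else 0) = pvRun cs (i + 1) := by
      simp only [pvRun, hgetD]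
    rw [hcast, this, ih (i + 1) (by omega)]

theorem pvALoop_no_dollar (cs : List Char) (h : '$' ∉ cs) (n : Int) :
    ∀ (fuel : Nat) (index : Int), pvALoop cs n index fuel = -1 := by
  intro fuel
  induction fuel with
  | zero => intro index; rfl
  | succ fuel ih =>
    intro index
    simp only [pvALoop]
    split
    · rw [if_neg (by
        rintro ⟨hd, -⟩
        exact h (PySem.List.mem_of_pyGet?_eq_some (xs := cs) (i := index) hd))]
      exact ih _
    · rfl

theorem pvBLoop_no_dollar (cs : List Char) (n start : Int) :
    ∀ (rest : List Char), '$' ∉ rest → ∀ (i run : Int), pvBLoop cs n start rest i run = -1 := by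
  intro rest
  induction rest with
  | nil => intro _ i run; rfl
  | cons ch rest ih =>
    intro h i run
    simp only [pvBLoop]
    rw [if_neg (by rintro ⟨-, hd, -⟩; exact h (by simp [hd]))]
    exact ih (by simp at h; exact h.2) _ _

-- ===== VERDICT (by name: the statement is the Claim_ definition above) =====
theorem find_inline_math_end_py_spec : Claim_equal_find_inline_math_end_py := by
  intro text start _ hpre
  rcases hpre with h0 | ⟨hlen, hnd⟩
  case inr =>
    unfold Spec_find_inline_math_end_py find_inline_math_end_py find_inline_math_end_py_alt
    rw [pvALoop_no_dollar text.toList hnd, pvBLoop_no_dollar text.toList _ _ _ hnd]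
  case inl =>
    unfold Spec_find_inline_math_end_py find_inline_math_end_py find_inline_math_end_py_alt
    set cs := text.toList with hcs
    simp only []
    by_cases hbig : (cs.length : Int) ≤ start
    · -- start beyond the text: A's loop gets fuel 0; B skips every character
      have hfuel : ((cs.length : Int) - start).toNat = 0 := by omega
      rw [hfuel]
      have := pvPrefix cs start cs.length le_rfl hbig cs.length 0 (by omega)
      simp only [List.drop_zero, Nat.cast_zero] at this
      rw [show pvRun cs 0 = 0 from rfl] at this
      rw [this]
      simp [pvALoop, pvBLoop, List.drop_length]
    · have hlt : start < (cs.length : Int) := by omega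
      obtain ⟨s, rfl⟩ : ∃ s : Nat, start = (s : Int) := ⟨start.toNat, by omega⟩
      have hslen : s ≤ cs.length := by exact_mod_cast le_of_lt hlt
      have hfuel : ((cs.length : Int) - (s : Int)).toNat = cs.length - s := by omega
      rw [hfuel, pvMain cs (s : Int) (cs.length - s) s (by omega) le_rfl]
      have := pvPrefix cs (s : Int) s hslen le_rfl s 0 (by omega)
      simp only [List.drop_zero, Nat.cast_zero] at this
      rw [show pvRun cs 0 = 0 from rfl] at this
      rw [← this]
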